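-- pv_equiv track=rewrite | github.com/NoisNette/Codesignal-solutions | permutationShift.py | permutationShift
-- ===== SOURCE A (Python) =====
-- def permutationShift(permutation):
--     ans = []
--     s = sorted(permutation)
--     for i in range(len(permutation)):
--         a = permutation[i]
--         x = s.index(a) - i
--         ans.append(x)
--     return max(ans) - min(ans)
-- ===== SOURCE B (Python) =====
-- def permutationShift(permutation):
--     ans = [sum(1 for x in permutation if x < a) - i
--            for i, a in enumerate(permutation)]
--     return max(ans) - min(ans)
-- ===== Notes on version B (the rewrite author's own statement) =====
-- stated objective: simpler
-- what changed: Drops the sort and the repeated s.index scan: each element's sorted rank is computed directly as the count of strictly smaller elements in one comprehension over enumerate.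
-- outside the precondition, e.g. on permutationShift([]): A raises ValueError, B raises ValueError
import Mathlib
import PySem

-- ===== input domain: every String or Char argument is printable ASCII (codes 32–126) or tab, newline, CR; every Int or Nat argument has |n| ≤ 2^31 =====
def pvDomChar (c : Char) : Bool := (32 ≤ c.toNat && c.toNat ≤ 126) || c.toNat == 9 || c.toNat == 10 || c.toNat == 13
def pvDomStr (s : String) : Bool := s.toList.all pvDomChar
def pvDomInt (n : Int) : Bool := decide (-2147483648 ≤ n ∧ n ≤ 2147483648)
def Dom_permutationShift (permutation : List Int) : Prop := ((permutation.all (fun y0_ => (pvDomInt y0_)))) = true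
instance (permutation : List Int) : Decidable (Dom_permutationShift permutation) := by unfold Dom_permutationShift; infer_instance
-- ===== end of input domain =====

-- B replaces sort + repeated s.index scans by directly counting strictly smaller elements (simpler, no sorted array).

-- ===== PORT A =====
-- permutation[i] is always in range (0 ≤ i < len), and a is always in s, so the
-- .getD defaults are never taken; max/min on the empty list raise (excluded by Pre_).
def permutationShift (permutation : List Int) : Int :=
  let s := PySem.List.sorted permutation (fun x => x) false
  let ans := (PySem.List.pyRange 0 (permutation.length : Int) 1).foldl
    (fun ans i =>
      let a := PySem.List.pyGetD permutation i 0
      let x := (((PySem.List.index? s a).getD 0 : Nat) : Int) - i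
      ans ++ [x]) []
  (PySem.List.max? ans (fun y => y)).getD 0 - (PySem.List.min? ans (fun y => y)).getD 0

-- ===== PORT B =====
def permutationShift_alt (permutation : List Int) : Int :=
  let ans := (PySem.List.enumerate permutation 0).map
    (fun p => permutation.foldl (fun c x => if x < p.2 then c + 1 else c) (0 : Int) - p.1)
  (PySem.List.max? ans (fun y => y)).getD 0 - (PySem.List.min? ans (fun y => y)).getD 0

-- ===== PRECONDITION & SPEC =====
-- Pre_ excludes only the empty list, on which Python's max([]) raises ValueError (in both A and B).
def Pre_permutationShift (permutation : List Int) : Prop := permutation ≠ []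
instance (permutation : List Int) : Decidable (Pre_permutationShift permutation) := by unfold Pre_permutationShift; infer_instance
def pvWitness_permutationShift : List Int := [3, 1, 2]
def Spec_permutationShift (permutation : List Int) (out : Int) : Prop := out = permutationShift_alt permutation
instance (permutation : List Int) (out : Int) : Decidable (Spec_permutationShift permutation out) := by unfold Spec_permutationShift; infer_instance

-- ===== CLAIM (what is proved, stated in full; the proofs are below) =====
def Claim_equal_permutationShift : Prop := ∀ (permutation : List Int), Dom_permutationShift permutation → Pre_permutationShift permutation → Spec_permutationShift permutation (permutationShift permutation)

-- ===== LEMMAS AND PROOFS =====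

-- In a (≤)-sorted list, the index of the first occurrence of a member equals
-- the number of strictly smaller elements.
theorem index?_of_sorted_eq_countP (s : List Int) (hs : s.Pairwise (· ≤ ·)) (a : Int)
    (ha : a ∈ s) :
    PySem.List.index? s a = some (s.countP (fun x => decide (x < a))) := by
  induction s with
  | nil => cases ha
  | cons b t ih =>
    rcases List.pairwise_cons.mp hs with ⟨hb, ht⟩
    by_cases hba : b = a
    · subst hba
      have hzero : t.countP (fun x => decide (x < b)) = 0 := by
        rw [List.countP_eq_zero]
        intro x hx
        simp only [decide_eq_true_eq]
        exact not_lt.mpr (hb x hx)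
      rw [PySem.List.index?_cons_self]
      simp [hzero]
    · have hat : a ∈ t := by
        rcases List.mem_cons.mp ha with h | h
        · exact absurd h.symm hba
        · exact h
      have hlt : b < a := lt_of_le_of_ne (hb a hat) hba
      rw [PySem.List.index?_cons_of_ne t hba, ih ht hat]
      simp [hlt]

-- The i-th value A appends equals the i-th value B computes.
theorem body_eq (permutation : List Int) (j : Int)
    (hj : j ∈ PySem.List.pyRange 0 (permutation.length : Int) 1) :
    (((PySem.List.index? (PySem.List.sorted permutation (fun x => x) false)
        (PySem.List.pyGetD permutation j 0)).getD 0 : Nat) : Int) - j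
    = permutation.foldl
        (fun c x => if x < PySem.List.pyGetD permutation j 0 then c + 1 else c) (0 : Int) - j := by
  have hjr := (PySem.List.mem_pyRange_one).mp hj
  set a := PySem.List.pyGetD permutation j 0 with ha
  have hmem : a ∈ permutation := by
    rw [ha, PySem.List.pyGetD_eq_getElem permutation 0 (by omega) (by omega)]
    exact List.getElem_mem _
  have hsortmem : a ∈ PySem.List.sorted permutation (fun x => x) false :=
    (PySem.List.mem_sorted permutation (fun x => x) false a).mpr hmem
  have hidx := index?_of_sorted_eq_countP (PySem.List.sorted permutation (fun x => x) false)
    (PySem.List.sorted_pairwise permutation (fun x => x)) a hsortmem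
  have hcnt : (PySem.List.sorted permutation (fun x => x) false).countP (fun x => decide (x < a))
      = permutation.countP (fun x => decide (x < a)) :=
    (PySem.List.sorted_perm permutation (fun x => x) false).countP_eq _
  rw [hidx, PySem.List.foldl_ite_add_one (fun x => x < a) permutation 0]
  simp [hcnt]

theorem ans_eq (permutation : List Int) :
    (PySem.List.pyRange 0 (permutation.length : Int) 1).foldl
      (fun ans i =>
        let a := PySem.List.pyGetD permutation i 0
        let x := (((PySem.List.index? (PySem.List.sorted permutation (fun y => y) false) a).getD 0 : Nat) : Int) - i
        ans ++ [x]) []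
    = (PySem.List.enumerate permutation 0).map
        (fun p => permutation.foldl (fun c x => if x < p.2 then c + 1 else c) (0 : Int) - p.1) := by
  rw [PySem.List.foldl_append_singleton_eq_map, List.nil_append,
    PySem.List.enumerate_eq_map_pyRange permutation 0, List.map_map]
  exact List.map_congr_left (fun j hj => body_eq permutation j hj)

-- ===== VERDICT (by name: the statement is the Claim_ definition above) =====
theorem permutationShift_spec : Claim_equal_permutationShift := by
  intro permutation _ _
  unfold Spec_permutationShift permutationShift permutationShift_alt
  simp only [ans_eq]
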